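-- pv_equiv track=rewrite | github.com/ilp2023-27/data | multishot/abduce_multishot.py | recursive_labeling
-- ===== SOURCE A (Python) =====
-- def recursive_labeling(node, graph, labels):
-- 	label = labels[node]
-- 	children = sorted(graph[node])
-- 	if label in {'~', 'G', 'F', 'X'}:
-- 		return '({}({}))'.format(label, recursive_labeling(children[0], graph, labels))
-- 	elif label in {'->', '&', '|', 'U'}:
-- 		lhs = recursive_labeling(children[0], graph, labels)
-- 		rhs = recursive_labeling(children[1], graph, labels)
-- 		return '({}{}{})'.format(lhs, label, rhs)
-- 	else: # proposition
-- 		return "({})".format(label)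
-- ===== SOURCE B (Python) =====
-- def recursive_labeling(node, graph, labels):
-- 	unary = {'~', 'G', 'F', 'X'}
-- 	binary = {'->', '&', '|', 'U'}
-- 	done = {}
-- 	for _ in range(len(graph) + 1):
-- 		if node in done:
-- 			break
-- 		for n, cs in graph.items():
-- 			if n in done or n not in labels:
-- 				continue
-- 			label = labels[n]
-- 			cs = sorted(cs)
-- 			if label in unary:
-- 				if cs and cs[0] in done:
-- 					done[n] = '({}({}))'.format(label, done[cs[0]])
-- 			elif label in binary:
-- 				if len(cs) > 1 and cs[0] in done and cs[1] in done:
-- 					done[n] = '({}{}{})'.format(done[cs[0]], label, done[cs[1]])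
-- 			else:
-- 				done[n] = '({})'.format(label)
-- 	return done[node]
-- ===== Notes on version B (the rewrite author's own statement) =====
-- stated objective: alternative
-- what changed: Replaces A's top-down recursion by a bottom-up worklist fixpoint: B sweeps the graph for at most len(graph)+1 rounds, resolving (and memoising in a dict) every node whose required children are already resolved, then reads the root's string off the table.
import Mathlib
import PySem

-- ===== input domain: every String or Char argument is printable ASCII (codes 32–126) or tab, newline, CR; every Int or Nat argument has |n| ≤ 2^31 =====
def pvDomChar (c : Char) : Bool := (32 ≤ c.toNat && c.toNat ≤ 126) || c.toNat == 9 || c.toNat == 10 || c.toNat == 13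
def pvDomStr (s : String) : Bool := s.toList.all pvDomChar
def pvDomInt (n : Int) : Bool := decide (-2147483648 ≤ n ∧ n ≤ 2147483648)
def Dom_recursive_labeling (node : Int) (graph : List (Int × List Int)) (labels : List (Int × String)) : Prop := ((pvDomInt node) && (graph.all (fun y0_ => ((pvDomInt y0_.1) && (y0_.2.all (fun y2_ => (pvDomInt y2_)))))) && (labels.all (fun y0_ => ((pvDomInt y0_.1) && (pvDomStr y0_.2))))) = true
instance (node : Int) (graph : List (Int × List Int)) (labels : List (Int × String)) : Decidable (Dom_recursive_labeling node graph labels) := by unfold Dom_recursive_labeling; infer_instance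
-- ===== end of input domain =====

-- B replaces A's top-down recursion by a bottom-up worklist fixpoint: it sweeps the graph
-- for at most len(graph)+1 rounds, resolving every node whose required children are already
-- resolved, then reads off the root's string (objective: alternative decomposition, same result).


-- label in {'~','G','F','X'} / {'->','&','|','U'}
def isUnaryOp (l : String) : Bool := l == "~" || l == "G" || l == "F" || l == "X"
def isBinaryOp (l : String) : Bool := l == "->" || l == "&" || l == "|" || l == "U"

-- ===== PORT A =====
-- A's recursion, step for step; the Nat fuel is only a totality guard (Python raises or
-- diverges exactly where the fuel runs out or a lookup/index fails, see Pre_ below):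
-- none = the call raises (KeyError/IndexError) or recurses forever.
def aGo (graph : List (Int × List Int)) (labels : List (Int × String)) : Nat → Int → Option String
  | 0, _ => none
  | f + 1, node =>
    match List.lookup node labels with                        -- labels[node]
    | none => none
    | some label =>
      match List.lookup node graph with                       -- graph[node]
      | none => none
      | some cs =>
        -- children := sorted(graph[node]); inlined below
        if isUnaryOp label then
          match PySem.List.pyGet? (PySem.List.sorted cs (fun x => x) false) 0 with   -- children[0]
          | none => none
          | some c =>
            match aGo graph labels f c with
            | none => none
            | some s => some ("(" ++ label ++ "(" ++ s ++ "))")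
        else if isBinaryOp label then
          match PySem.List.pyGet? (PySem.List.sorted cs (fun x => x) false) 0 with   -- children[0]
          | none => none
          | some c0 =>
            match aGo graph labels f c0 with                  -- lhs first
            | none => none
            | some lhs =>
              match PySem.List.pyGet? (PySem.List.sorted cs (fun x => x) false) 1 with   -- children[1]
              | none => none
              | some c1 =>
                match aGo graph labels f c1 with
                | none => none
                | some rhs => some ("(" ++ lhs ++ label ++ rhs ++ ")")
        else some ("(" ++ label ++ ")")                        -- proposition

def recursive_labeling (node : Int) (graph : List (Int × List Int)) (labels : List (Int × String)) : String :=
  (aGo graph labels (graph.length + 1) node).getD ""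

-- ===== PORT B =====
-- one sweep body: try to resolve entry e.1 from the already-resolved table `done`
def bStep (labels : List (Int × String)) (done : PySem.Dict Int String) (e : Int × List Int) : PySem.Dict Int String :=
  if (done.get? e.1).isSome then done
  else
    match List.lookup e.1 labels with
    | none => done
    | some label =>
      if isUnaryOp label then
        match PySem.List.sorted e.2 (fun x => x) false with
        | [] => done
        | c :: _ =>
          match done.get? c with
          | none => done
          | some s => done.insert e.1 ("(" ++ label ++ "(" ++ s ++ "))")
      else if isBinaryOp label then
        match PySem.List.sorted e.2 (fun x => x) false with
        | c0 :: c1 :: _ =>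
          match done.get? c0, done.get? c1 with
          | some s0, some s1 => done.insert e.1 ("(" ++ s0 ++ label ++ s1 ++ ")")
          | _, _ => done
        | _ => done
      else done.insert e.1 ("(" ++ label ++ ")")

-- for _ in range(len(graph)+1): if node in done: break; <sweep all graph entries>
def bLoop (graph : List (Int × List Int)) (labels : List (Int × String)) : Nat → PySem.Dict Int String → Int → PySem.Dict Int String
  | 0, done, _ => done
  | r + 1, done, node =>
    if (done.get? node).isSome then done
    else bLoop graph labels r (graph.foldl (bStep labels) done) node

def recursive_labeling_alt (node : Int) (graph : List (Int × List Int)) (labels : List (Int × String)) : String :=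
  ((bLoop graph labels (graph.length + 1) PySem.Dict.empty node).get? node).getD ""

-- ===== PRECONDITION & SPEC =====
-- structural well-formedness: node roots a well-formed formula tree inside graph/labels
-- (every reached node has a label and a children list of the arity its label demands).
-- The fuel graph.length+1 is exact, not a size cap: a successful Python run never repeats
-- a node on a call path (a repeat would recurse forever), so its depth is at most the
-- number of graph keys.
def wfGo (graph : List (Int × List Int)) (labels : List (Int × String)) : Nat → Int → Bool
  | 0, _ => false
  | f + 1, n =>
    match List.lookup n labels with
    | none => false
    | some label =>
      match List.lookup n graph with
      | none => false
      | some cs0 =>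
        if isUnaryOp label then
          match PySem.List.sorted cs0 (fun x => x) false with
          | [] => false
          | c :: _ => wfGo graph labels f c
        else if isBinaryOp label then
          match PySem.List.sorted cs0 (fun x => x) false with
          | c0 :: c1 :: _ => wfGo graph labels f c0 && wfGo graph labels f c1
          | _ => false
        else true

-- Pre_ holds exactly when Python A returns normally: it excludes the inputs on which A raises
-- KeyError (missing label / graph entry), IndexError (too few children) or RecursionError
-- (a cycle reached from node).
-- The Nodup conjunct only excludes assoc lists with duplicate graph keys, which cannot arise
-- from a Python dict (an artifact of the assoc-list encoding of dicts).
def Pre_recursive_labeling (node : Int) (graph : List (Int × List Int)) (labels : List (Int × String)) : Prop :=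
  wfGo graph labels (graph.length + 1) node = true ∧ (graph.map Prod.fst).Nodup
instance (node : Int) (graph : List (Int × List Int)) (labels : List (Int × String)) : Decidable (Pre_recursive_labeling node graph labels) := by unfold Pre_recursive_labeling; infer_instance

def pvWitness_recursive_labeling : Int × (List (Int × List Int)) × (List (Int × String)) :=
  (1, [(1, [2, 3]), (2, [4]), (3, []), (4, [])], [(1, "U"), (2, "~"), (3, "q"), (4, "p")])

def Spec_recursive_labeling (node : Int) (graph : List (Int × List Int)) (labels : List (Int × String)) (out : String) : Prop := out = recursive_labeling_alt node graph labels
instance (node : Int) (graph : List (Int × List Int)) (labels : List (Int × String)) (out : String) : Decidable (Spec_recursive_labeling node graph labels out) := by unfold Spec_recursive_labeling; infer_instance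

-- ===== CLAIM (what is proved, stated in full; the proofs are below) =====
def Claim_equal_recursive_labeling : Prop := ∀ (node : Int) (graph : List (Int × List Int)) (labels : List (Int × String)), Dom_recursive_labeling node graph labels → Pre_recursive_labeling node graph labels → Spec_recursive_labeling node graph labels (recursive_labeling node graph labels)

-- ===== LEMMAS AND PROOFS =====

-- first-match lookup of a member, when keys are unique
theorem lookup_eq_of_mem_nodup {β : Type} (k : Int) (v : β) (l : List (Int × β))
    (h : (k, v) ∈ l) (hnd : (l.map Prod.fst).Nodup) : List.lookup k l = some v := by
  induction l with
  | nil => cases h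
  | cons p rest ih =>
    simp only [List.map_cons, List.nodup_cons, List.mem_map] at hnd
    rcases List.mem_cons.mp h with h | h
    · subst h; simp [List.lookup]
    · have hkp : ¬ (k == p.1) = true := by
        intro hb
        exact hnd.1 ⟨(k, v), h, by simpa using (beq_iff_eq.mp hb)⟩
      simp [List.lookup, hkp, ih h hnd.2]

theorem pyGet_cons_zero {α : Type} (c : α) (t : List α) : PySem.List.pyGet? (c :: t) 0 = some c := by
  simp

theorem pyGet_cons_one {α : Type} (c0 c1 : α) (t : List α) : PySem.List.pyGet? (c0 :: c1 :: t) 1 = some c1 := by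
  simp [PySem.List.pyGet?, PySem.List.pyIdx?]

-- `bStep` never removes or changes an existing entry
theorem bStep_mono (labels : List (Int × String)) (done : PySem.Dict Int String)
    (e : Int × List Int) (m : Int) (s : String) (h : done.get? m = some s) :
    (bStep labels done e).get? m = some s := by
  have hins : ∀ v : String, (done.get? e.1).isSome = false → (done.insert e.1 v).get? m = some s := by
    intro v hn
    rw [PySem.Dict.get?_insert]
    split_ifs with he
    · subst he; rw [h] at hn; simp at hn
    · exact h
  unfold bStep
  by_cases h1 : (done.get? e.1).isSome = true
  · rw [if_pos h1]; exact h
  · rw [if_neg h1]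
    have h1' : (done.get? e.1).isSome = false := by simpa using h1
    cases hlab : List.lookup e.1 labels with
    | none => exact h
    | some label =>
      simp only []
      by_cases hun : isUnaryOp label = true
      · rw [if_pos hun]
        cases hcs : PySem.List.sorted e.2 (fun x => x) false with
        | nil => exact h
        | cons c t =>
          simp only []
          cases hc : done.get? c with
          | none => exact h
          | some s' => exact hins _ h1'
      · rw [if_neg hun]
        by_cases hbin : isBinaryOp label = true
        · rw [if_pos hbin]
          cases hcs : PySem.List.sorted e.2 (fun x => x) false with
          | nil => exact h
          | cons c0 t0 =>
            cases t0 with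
            | nil => exact h
            | cons c1 t =>
              simp only []
              cases h0 : done.get? c0 with
              | none =>
                cases h1 : done.get? c1 with
                | none => exact h
                | some s1 => exact h
              | some s0 =>
                cases h1 : done.get? c1 with
                | none => exact h
                | some s1 => exact hins _ h1'
        · rw [if_neg hbin]
          exact hins _ h1'

theorem foldl_bStep_mono (labels : List (Int × String)) (es : List (Int × List Int))
    (done : PySem.Dict Int String) (m : Int) (s : String) (h : done.get? m = some s) :
    (es.foldl (bStep labels) done).get? m = some s := by
  induction es generalizing done with
  | nil => exact h
  | cons e rest ih => exact ih _ (bStep_mono labels done e m s h)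

-- fuel monotonicity of A's recursion
theorem aGo_mono (graph : List (Int × List Int)) (labels : List (Int × String)) :
    ∀ (f' f : Nat) (n : Int) (s : String), f ≤ f' → aGo graph labels f n = some s →
      aGo graph labels f' n = some s := by
  intro f'
  induction f' with
  | zero => intro f n s hf h; interval_cases f; simp [aGo] at h
  | succ f' ih =>
    intro f n s hf h
    match f, hf with
    | 0, _ => simp [aGo] at h
    | Nat.succ f, hf =>
      have hff : f ≤ f' := Nat.le_of_succ_le_succ hf
      rw [aGo] at h ⊢
      cases hlab : List.lookup n labels with
      | none => rw [hlab] at h; exact absurd h (by simp)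
      | some label =>
        rw [hlab] at h
        simp only [] at h ⊢
        cases hg : List.lookup n graph with
        | none => rw [hg] at h; exact absurd h (by simp)
        | some cs =>
          rw [hg] at h
          simp only [] at h ⊢
          by_cases hun : isUnaryOp label = true
          · rw [if_pos hun] at h ⊢
            cases hc : PySem.List.pyGet? (PySem.List.sorted cs (fun x => x) false) 0 with
            | none => rw [hc] at h; simp at h
            | some c =>
              rw [hc] at h
              simp only [] at h ⊢
              cases hrec : aGo graph labels f c with
              | none => rw [hrec] at h; simp at h
              | some sc =>
                rw [hrec] at h
                rw [ih f c sc hff hrec]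
                simp only [] at h ⊢
                exact h
          · rw [if_neg hun] at h ⊢
            by_cases hbin : isBinaryOp label = true
            · rw [if_pos hbin] at h ⊢
              cases hc0 : PySem.List.pyGet? (PySem.List.sorted cs (fun x => x) false) 0 with
              | none => rw [hc0] at h; simp at h
              | some c0 =>
                rw [hc0] at h
                simp only [] at h ⊢
                cases hr0 : aGo graph labels f c0 with
                | none => rw [hr0] at h; simp at h
                | some s0 =>
                  rw [hr0] at h
                  rw [ih f c0 s0 hff hr0]
                  simp only [] at h ⊢
                  cases hc1 : PySem.List.pyGet? (PySem.List.sorted cs (fun x => x) false) 1 with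
                  | none => rw [hc1] at h; simp at h
                  | some c1 =>
                    rw [hc1] at h
                    simp only [] at h ⊢
                    cases hr1 : aGo graph labels f c1 with
                    | none => rw [hr1] at h; simp at h
                    | some s1 =>
                      rw [hr1] at h
                      rw [ih f c1 s1 hff hr1]
                      simp only [] at h ⊢
                      exact h
            · rw [if_neg hbin] at h ⊢
              exact h

-- soundness invariant: everything in `done` is a value A's recursion produces
def GoodTable (graph : List (Int × List Int)) (labels : List (Int × String))
    (done : PySem.Dict Int String) : Prop :=
  ∀ n s, done.get? n = some s → ∃ f, aGo graph labels f n = some s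

theorem bStep_good (graph : List (Int × List Int)) (labels : List (Int × String))
    (done : PySem.Dict Int String) (e : Int × List Int) (he : e ∈ graph)
    (hnd : (graph.map Prod.fst).Nodup) (hg : GoodTable graph labels done) :
    GoodTable graph labels (bStep labels done e) := by
  have hlk : List.lookup e.1 graph = some e.2 := lookup_eq_of_mem_nodup e.1 e.2 graph he hnd
  intro n s hn
  have hfromins : ∀ (v : String), (done.insert e.1 v).get? n = some s →
      (n = e.1 ∧ s = v) ∨ done.get? n = some s := by
    intro v hv
    rw [PySem.Dict.get?_insert] at hv
    split_ifs at hv with hne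
    · exact Or.inl ⟨hne, by simpa using hv.symm⟩
    · exact Or.inr hv
  unfold bStep at hn
  by_cases h1 : (done.get? e.1).isSome = true
  · rw [if_pos h1] at hn; exact hg n s hn
  · rw [if_neg h1] at hn
    cases hlab : List.lookup e.1 labels with
    | none => rw [hlab] at hn; exact hg n s hn
    | some label =>
      rw [hlab] at hn
      simp only [] at hn
      by_cases hun : isUnaryOp label = true
      · rw [if_pos hun] at hn
        cases hcs : PySem.List.sorted e.2 (fun x => x) false with
        | nil => rw [hcs] at hn; exact hg n s hn
        | cons c t =>
          rw [hcs] at hn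
          simp only [] at hn
          cases hc : done.get? c with
          | none => rw [hc] at hn; exact hg n s hn
          | some sc =>
            rw [hc] at hn
            simp only [] at hn
            have hn' : (done.insert e.1 ("(" ++ label ++ "(" ++ sc ++ "))")).get? n = some s := hn
            rcases hfromins _ hn' with ⟨hne, hsv⟩ | hold
            · subst hne; subst hsv
              obtain ⟨f, hf⟩ := hg c sc hc
              refine ⟨f + 1, ?_⟩
              rw [aGo, hlab, hlk]
              simp only [if_pos hun]
              have hp : PySem.List.pyGet? (PySem.List.sorted e.2 (fun x => x) false) 0 = some c := by
                rw [hcs]; exact pyGet_cons_zero c t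
              rw [hp]
              simp only []
              rw [hf]
            · exact hg n s hold
      · rw [if_neg hun] at hn
        by_cases hbin : isBinaryOp label = true
        · rw [if_pos hbin] at hn
          cases hcs : PySem.List.sorted e.2 (fun x => x) false with
          | nil => rw [hcs] at hn; exact hg n s hn
          | cons c0 t0 =>
            rw [hcs] at hn
            cases t0 with
            | nil => exact hg n s hn
            | cons c1 t =>
              simp only [] at hn
              cases h0 : done.get? c0 with
              | none =>
                rw [h0] at hn
                exact hg n s hn
              | some s0 =>
                rw [h0] at hn
                cases h1c : done.get? c1 with
                | none => rw [h1c] at hn; exact hg n s hn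
                | some s1 =>
                  rw [h1c] at hn
                  simp only [] at hn
                  have hn' : (done.insert e.1 ("(" ++ s0 ++ label ++ s1 ++ ")")).get? n = some s := hn
                  rcases hfromins _ hn' with ⟨hne, hsv⟩ | hold
                  · subst hne; subst hsv
                    obtain ⟨f0, hf0⟩ := hg c0 s0 h0
                    obtain ⟨f1, hf1⟩ := hg c1 s1 h1c
                    refine ⟨max f0 f1 + 1, ?_⟩
                    rw [aGo, hlab, hlk]
                    simp only [if_neg hun, if_pos hbin]
                    have hp0 : PySem.List.pyGet? (PySem.List.sorted e.2 (fun x => x) false) 0 = some c0 := by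
                      rw [hcs]; exact pyGet_cons_zero c0 (c1 :: t)
                    have hp1 : PySem.List.pyGet? (PySem.List.sorted e.2 (fun x => x) false) 1 = some c1 := by
                      rw [hcs]; exact pyGet_cons_one c0 c1 t
                    rw [hp0]
                    simp only []
                    rw [aGo_mono graph labels (max f0 f1) f0 c0 s0 (Nat.le_max_left _ _) hf0]
                    simp only []
                    rw [hp1]
                    simp only []
                    rw [aGo_mono graph labels (max f0 f1) f1 c1 s1 (Nat.le_max_right _ _) hf1]
                  · exact hg n s hold
        · rw [if_neg hbin] at hn
          have hn' : (done.insert e.1 ("(" ++ label ++ ")")).get? n = some s := hn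
          rcases hfromins _ hn' with ⟨hne, hsv⟩ | hold
          · subst hne; subst hsv
            refine ⟨1, ?_⟩
            rw [aGo, hlab, hlk]
            simp only [if_neg hun, if_neg hbin]
          · exact hg n s hold

theorem foldl_bStep_good (graph : List (Int × List Int)) (labels : List (Int × String))
    (hnd : (graph.map Prod.fst).Nodup) :
    ∀ (es : List (Int × List Int)) (done : PySem.Dict Int String),
      (∀ e ∈ es, e ∈ graph) → GoodTable graph labels done →
      GoodTable graph labels (es.foldl (bStep labels) done) := by
  intro es
  induction es with
  | nil => intro done _ hg; exact hg
  | cons e rest ih =>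
    intro done hmem hg
    exact ih _ (fun x hx => hmem x (List.mem_cons_of_mem e hx))
      (bStep_good graph labels done e (hmem e (List.mem_cons_self)) hnd hg)

theorem bLoop_good (graph : List (Int × List Int)) (labels : List (Int × String))
    (hnd : (graph.map Prod.fst).Nodup) :
    ∀ (r : Nat) (done : PySem.Dict Int String) (node : Int),
      GoodTable graph labels done → GoodTable graph labels (bLoop graph labels r done node) := by
  intro r
  induction r with
  | zero => intro done node hg; exact hg
  | succ r ih =>
    intro done node hg
    rw [bLoop]
    split
    · exact hg
    · exact ih _ node (foldl_bStep_good graph labels hnd graph done (fun _ hx => hx) hg)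

-- one sweep resolves any entry whose children are already resolved
theorem sweep_resolves (labels : List (Int × String)) (n : Int) (cs0 : List Int)
    (done : PySem.Dict Int String)
    (hres : ∀ d : PySem.Dict Int String,
      (∀ m v, done.get? m = some v → d.get? m = some v) → (d.get? n).isSome = false →
      ((bStep labels d (n, cs0)).get? n).isSome = true) :
    ∀ (es : List (Int × List Int)) (d : PySem.Dict Int String),
      List.lookup n es = some cs0 →
      (∀ m v, done.get? m = some v → d.get? m = some v) →
      ((es.foldl (bStep labels) d).get? n).isSome = true := by
  intro es
  induction es with
  | nil => intro d h _; simp [List.lookup] at h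
  | cons e rest ih =>
    intro d hlk hext
    cases hbe : (e.1 == n) with
    | true =>
      have he1 : e.1 = n := beq_iff_eq.mp hbe
      have hcs : e.2 = cs0 := by
        cases e with
        | mk k v =>
          simp only [List.lookup, show (n == k) = true by simp_all [beq_iff_eq]] at hlk
          simpa using hlk
      cases hd : (d.get? n).isSome with
      | true =>
        obtain ⟨v, hv⟩ := Option.isSome_iff_exists.mp hd
        simp only [List.foldl_cons]
        have := foldl_bStep_mono labels rest (bStep labels d e) n v
          (bStep_mono labels d e n v hv)
        simp [this]
      | false =>
        have : ((bStep labels d (n, cs0)).get? n).isSome = true := hres d hext hd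
        obtain ⟨v, hv⟩ := Option.isSome_iff_exists.mp this
        have he : e = (n, cs0) := by cases e; simp_all
        simp only [List.foldl_cons, he]
        simp [foldl_bStep_mono labels rest _ n v hv]
    | false =>
      have hne : ¬ (n == e.1) = true := by
        intro hb; rw [beq_iff_eq.mp hb] at hbe; simp at hbe
      have hlk' : List.lookup n rest = some cs0 := by
        cases e with
        | mk k v => simp only [List.lookup, hne] at hlk; simpa [List.lookup, hne] using hlk
      exact ih (bStep labels d e)
        hlk' (fun m v hv => bStep_mono labels d e m v (hext m v hv))

-- after a sweep, everything well-formed one level deeper is resolved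
theorem round_progress (graph : List (Int × List Int)) (labels : List (Int × String))
    (k : Nat) (done : PySem.Dict Int String)
    (hdone : ∀ m, wfGo graph labels k m = true → (done.get? m).isSome = true) :
    ∀ n, wfGo graph labels (k + 1) n = true →
      ((graph.foldl (bStep labels) done).get? n).isSome = true := by
  intro n hwf
  rw [wfGo] at hwf
  cases hlab : List.lookup n labels with
  | none => rw [hlab] at hwf; simp at hwf
  | some label =>
    rw [hlab] at hwf
    simp only [] at hwf
    cases hg : List.lookup n graph with
    | none => rw [hg] at hwf; simp at hwf
    | some cs0 =>
      rw [hg] at hwf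
      simp only [] at hwf
      refine sweep_resolves labels n cs0 done ?_ graph done hg (fun _ _ h => h)
      intro d hext hdn
      unfold bStep
      rw [hdn]
      simp only [Bool.false_eq_true, if_false, hlab]
      by_cases hun : isUnaryOp label = true
      · rw [if_pos hun] at hwf ⊢
        cases hcs : PySem.List.sorted cs0 (fun x => x) false with
        | nil => rw [hcs] at hwf; simp at hwf
        | cons c t =>
          rw [hcs] at hwf
          simp only [] at hwf ⊢
          obtain ⟨v, hv⟩ := Option.isSome_iff_exists.mp (hdone c hwf)
          rw [hext c v hv]
          simp [PySem.Dict.get?_insert_self]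
      · rw [if_neg hun] at hwf ⊢
        by_cases hbin : isBinaryOp label = true
        · rw [if_pos hbin] at hwf ⊢
          cases hcs : PySem.List.sorted cs0 (fun x => x) false with
          | nil => rw [hcs] at hwf; simp at hwf
          | cons c0 t0 =>
            cases t0 with
            | nil => rw [hcs] at hwf; simp at hwf
            | cons c1 t =>
              rw [hcs] at hwf
              simp only [Bool.and_eq_true] at hwf
              simp only [] at hwf ⊢
              obtain ⟨v0, hv0⟩ := Option.isSome_iff_exists.mp (hdone c0 hwf.1)
              obtain ⟨v1, hv1⟩ := Option.isSome_iff_exists.mp (hdone c1 hwf.2)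
              rw [hext c0 v0 hv0, hext c1 v1 hv1]
              simp [PySem.Dict.get?_insert_self]
        · rw [if_neg hbin] at hwf ⊢
          simp [PySem.Dict.get?_insert_self]

theorem bLoop_resolves (graph : List (Int × List Int)) (labels : List (Int × String)) (node : Int) :
    ∀ (r k : Nat) (done : PySem.Dict Int String),
      (∀ m, wfGo graph labels k m = true → (done.get? m).isSome = true) →
      wfGo graph labels (k + r) node = true →
      ((bLoop graph labels r done node).get? node).isSome = true := by
  intro r
  induction r with
  | zero => intro k done hdone hwf; exact hdone node hwf
  | succ r ih =>
    intro k done hdone hwf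
    rw [bLoop]
    split
    · assumption
    · refine ih (k + 1) _ (round_progress graph labels k done hdone) ?_
      have : k + 1 + r = k + (r + 1) := by omega
      rw [this]; exact hwf

-- well-formedness implies A's recursion succeeds with the same fuel
theorem wf_aGo (graph : List (Int × List Int)) (labels : List (Int × String)) :
    ∀ (f : Nat) (n : Int), wfGo graph labels f n = true →
      ∃ s, aGo graph labels f n = some s := by
  intro f
  induction f with
  | zero => intro n h; simp [wfGo] at h
  | succ f ih =>
    intro n h
    rw [wfGo] at h
    rw [aGo]
    cases hlab : List.lookup n labels with
    | none => rw [hlab] at h; simp at h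
    | some label =>
      rw [hlab] at h
      simp only [] at h ⊢
      cases hg : List.lookup n graph with
      | none => rw [hg] at h; simp at h
      | some cs0 =>
        rw [hg] at h
        simp only [] at h ⊢
        by_cases hun : isUnaryOp label = true
        · rw [if_pos hun] at h ⊢
          cases hcs : PySem.List.sorted cs0 (fun x => x) false with
          | nil => rw [hcs] at h; simp at h
          | cons c t =>
            rw [hcs] at h
            obtain ⟨s, hs⟩ := ih c h
            rw [pyGet_cons_zero c t]
            simp only []
            rw [hs]
            exact ⟨_, rfl⟩
        · rw [if_neg hun] at h ⊢
          by_cases hbin : isBinaryOp label = true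
          · rw [if_pos hbin] at h ⊢
            cases hcs : PySem.List.sorted cs0 (fun x => x) false with
            | nil => rw [hcs] at h; simp at h
            | cons c0 t0 =>
              cases t0 with
              | nil => rw [hcs] at h; simp at h
              | cons c1 t =>
                rw [hcs] at h
                simp only [Bool.and_eq_true] at h
                obtain ⟨s0, hs0⟩ := ih c0 h.1
                obtain ⟨s1, hs1⟩ := ih c1 h.2
                rw [pyGet_cons_zero c0 (c1 :: t)]
                simp only []
                rw [hs0]
                simp only []
                rw [pyGet_cons_one c0 c1 t]
                simp only []
                rw [hs1]
                exact ⟨_, rfl⟩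
          · rw [if_neg hbin] at h ⊢
            exact ⟨_, rfl⟩

-- ===== VERDICT (by name: the statement is the Claim_ definition above) =====
theorem recursive_labeling_spec : Claim_equal_recursive_labeling := by
  intro node graph labels _ hpre
  obtain ⟨hwf, hnd⟩ := hpre
  unfold Spec_recursive_labeling recursive_labeling recursive_labeling_alt
  obtain ⟨s0, hs0⟩ := wf_aGo graph labels (graph.length + 1) node hwf
  have hres : ((bLoop graph labels (graph.length + 1) PySem.Dict.empty node).get? node).isSome = true := by
    refine bLoop_resolves graph labels node (graph.length + 1) 0 PySem.Dict.empty ?_ ?_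
    · intro m h; simp [wfGo] at h
    · simpa using hwf
  obtain ⟨s, hs⟩ := Option.isSome_iff_exists.mp hres
  have hgood : GoodTable graph labels (bLoop graph labels (graph.length + 1) PySem.Dict.empty node) := by
    refine bLoop_good graph labels hnd _ _ _ ?_
    intro n v h
    simp [PySem.Dict.get?_empty] at h
  obtain ⟨f, hf⟩ := hgood node s hs
  have h1 : aGo graph labels (max f (graph.length + 1)) node = some s :=
    aGo_mono graph labels _ f node s (Nat.le_max_left _ _) hf
  have h2 : aGo graph labels (max f (graph.length + 1)) node = some s0 :=
    aGo_mono graph labels _ _ node s0 (Nat.le_max_right _ _) hs0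
  rw [hs0, hs]
  rw [h1] at h2
  simpa using h2.symm
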